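-- pv_equiv track=rewrite | github.com/jcabre04/advent-of-code | advent_of_code/year_2015/day_1/run.py | part2
-- ===== SOURCE A (Python) =====
-- def part2(input: str) -> int:
--     "Find the char position that results in the first -1"
--     current = 0
--     for pos, char in enumerate(input, start=1):
--         if char == "(":
--             current += 1
--         elif char == ")":
--             current -= 1
--
--         if current == -1:
--             return pos
--     return -1
-- ===== SOURCE B (Python) =====
-- def _delta(c):
--     if c == "(":
--         return 1
--     if c == ")":
--         return -1
--     return 0
--
--
-- def part2(input: str) -> int:
--     "Find the char position that results in the first -1"
--     deltas = [_delta(c) for c in input]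
--     totals = []
--     t = 0
--     for d in deltas:
--         t += d
--         totals.append(t)
--     try:
--         return totals.index(-1) + 1
--     except ValueError:
--         return -1
-- ===== Notes on version B (the rewrite author's own statement) =====
-- stated objective: alternative
-- what changed: Replaces A's fused loop with early return by a three-stage pipeline: map chars to deltas, build the prefix-sum list, then locate -1 with list.index.
import Mathlib
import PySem

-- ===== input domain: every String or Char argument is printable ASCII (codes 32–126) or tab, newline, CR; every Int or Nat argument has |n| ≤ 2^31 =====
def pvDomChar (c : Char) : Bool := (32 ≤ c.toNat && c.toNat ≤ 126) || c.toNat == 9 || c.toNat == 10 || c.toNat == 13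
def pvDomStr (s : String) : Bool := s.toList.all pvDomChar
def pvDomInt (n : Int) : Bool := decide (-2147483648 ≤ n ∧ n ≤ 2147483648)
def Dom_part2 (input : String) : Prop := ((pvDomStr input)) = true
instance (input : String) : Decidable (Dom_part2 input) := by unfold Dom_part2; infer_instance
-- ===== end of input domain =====

-- B replaces A's fused loop (branch + early return) by a map → prefix-sum → first-index pipeline; objective: alternative decomposition, same cost.

-- ===== PORT A =====
-- A's for-loop with early return, as structural recursion over the characters,
-- carrying the running total `current` and the 1-based position `pos`.
def part2Go (cs : List Char) (current : Int) (pos : Int) : Int :=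
  match cs with
  | [] => -1
  | c :: rest =>
    let cur := if c = '(' then current + 1 else if c = ')' then current - 1 else current
    if cur = -1 then pos else part2Go rest cur (pos + 1)

def part2 (input : String) : Int := part2Go input.toList 0 1

-- ===== PORT B =====
def pvDelta (c : Char) : Int := if c = '(' then 1 else if c = ')' then -1 else 0

-- the running-totals list (Source B's accumulation loop, carrying t)
def pvTotals (ds : List Int) (t : Int) : List Int :=
  match ds with
  | [] => []
  | d :: rest => (t + d) :: pvTotals rest (t + d)

def part2_alt (input : String) : Int :=
  let deltas := input.toList.map pvDelta
  let totals := pvTotals deltas 0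
  match PySem.List.index? totals (-1) with
  | some i => (i : Int) + 1
  | none => -1

-- ===== PRECONDITION & SPEC =====
def Spec_part2 (input : String) (out : Int) : Prop := out = part2_alt input
instance (input : String) (out : Int) : Decidable (Spec_part2 input out) := by unfold Spec_part2; infer_instance

-- ===== CLAIM (what is proved, stated in full; the proofs are below) =====
def Claim_equal_part2 : Prop := ∀ (input : String), Dom_part2 input → Spec_part2 input (part2 input)

-- ===== LEMMAS AND PROOFS =====

-- The key invariant: A's fused loop from state (cur, pos) equals locating -1 in
-- the prefix sums of the remaining deltas started at cur, offset by pos.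
theorem part2Go_eq (cs : List Char) (cur pos : Int) :
    part2Go cs cur pos =
      (match PySem.List.index? (pvTotals (cs.map pvDelta) cur) (-1) with
       | some i => pos + (i : Int)
       | none => -1) := by
  induction cs generalizing cur pos with
  | nil => simp [part2Go, pvTotals, PySem.List.index?]
  | cons c rest ih =>
    have hstep : (if c = '(' then cur + 1 else if c = ')' then cur - 1 else cur)
        = cur + pvDelta c := by
      unfold pvDelta; split_ifs <;> omega
    simp only [part2Go, List.map, pvTotals, hstep]
    by_cases h : cur + pvDelta c = -1
    · rw [if_pos h, h, PySem.List.index?_cons_self]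
      simp
    · rw [if_neg h, PySem.List.index?_cons_of_ne _ h, ih]
      cases hidx : PySem.List.index? (pvTotals (rest.map pvDelta) (cur + pvDelta c)) (-1) with
      | none => simp
      | some i => simp
                  ring

-- ===== VERDICT (by name: the statement is the Claim_ definition above) =====
theorem part2_spec : Claim_equal_part2 := by
  intro input _
  unfold Spec_part2 part2 part2_alt
  simp only []
  rw [part2Go_eq]
  cases h : PySem.List.index? (pvTotals (input.toList.map pvDelta) 0) (-1) with
  | none => rfl
  | some i => simp only []
              ring
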